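-- pv_equiv track=rewrite | github.com/theredbluepill/arc-interactive | environment_files/pt02/63be02fb/pt02.py | _layout_centered
-- ===== SOURCE A (Python) =====
-- _PLAYFIELD_MAX_X = 43
--
-- def _layout_centered(n_tiles: int, ncols: int, stride: int) -> list[tuple[int, int]]:
--     nrows = (n_tiles + ncols - 1) // ncols
--     board_w = (ncols - 1) * stride + 3
--     board_h = (nrows - 1) * stride + 3
--     ox = max(2, (_PLAYFIELD_MAX_X - board_w) // 2)
--     oy = max(7, (58 - board_h) // 2)
--     out: list[tuple[int, int]] = []
--     for i in range(n_tiles):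
--         col, row = i % ncols, i // ncols
--         out.append((ox + col * stride, oy + row * stride))
--     return out
-- ===== SOURCE B (Python) =====
-- _PLAYFIELD_MAX_X = 43
--
-- def _layout_centered(n_tiles: int, ncols: int, stride: int) -> list[tuple[int, int]]:
--     # Staged: build the x-list of the columns actually used and the row y-list once,
--     # take their cross product (the grid) and slice off the first n_tiles points.
--     nrows = (n_tiles + ncols - 1) // ncols
--     span_x = (ncols - 1) * stride
--     span_y = (nrows - 1) * stride
--     ox = max(2, (_PLAYFIELD_MAX_X - 3 - span_x) // 2)
--     oy = max(7, (55 - span_y) // 2)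
--     xs = [ox + col * stride for col in range(min(ncols, n_tiles))]
--     ys = [oy + row * stride for row in range(nrows)]
--     grid = [(x, y) for y in ys for x in xs]
--     return grid[:n_tiles]
-- ===== Notes on version B (the rewrite author's own statement) =====
-- stated objective: alternative
-- what changed: Replaces the flat per-index loop with divmod arithmetic (i % ncols, i // ncols) by a staged construction: precompute the x-list of the columns actually used (min(ncols, n_tiles)) and the row y-list, take their cross product to build the grid, and slice off the first n_tiles points.
-- outside the precondition, e.g. on _layout_centered(3, -2, 4): A returns [(26, 29), (22, 25), (26, 25)], B returns []; on _layout_centered(3, 0, 4): A raises ZeroDivisionError, B raises ZeroDivisionError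
import Mathlib
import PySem

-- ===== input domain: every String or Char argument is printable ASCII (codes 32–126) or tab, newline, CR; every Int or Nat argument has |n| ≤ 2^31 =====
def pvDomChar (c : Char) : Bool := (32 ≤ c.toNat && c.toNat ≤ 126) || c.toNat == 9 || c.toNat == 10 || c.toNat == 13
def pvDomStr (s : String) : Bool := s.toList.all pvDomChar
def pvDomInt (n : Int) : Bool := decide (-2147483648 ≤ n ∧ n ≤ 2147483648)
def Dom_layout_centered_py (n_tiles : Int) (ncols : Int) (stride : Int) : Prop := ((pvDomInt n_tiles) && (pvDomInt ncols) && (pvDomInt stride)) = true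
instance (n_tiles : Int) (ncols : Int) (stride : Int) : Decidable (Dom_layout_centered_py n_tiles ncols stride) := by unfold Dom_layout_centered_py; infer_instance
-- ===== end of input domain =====

-- B stages the construction: column x-list and row y-list built once, full grid as their
-- cross product, then the first n_tiles points sliced off — instead of A's flat loop
-- computing (i % ncols, i // ncols) per tile (objective: alternative decomposition).

-- ===== PORT A =====
def layout_centered_py (n_tiles : Int) (ncols : Int) (stride : Int) : List (Int × Int) :=
  let nrows := PySem.Int.floordiv (n_tiles + ncols - 1) ncols
  let board_w := (ncols - 1) * stride + 3
  let board_h := (nrows - 1) * stride + 3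
  let ox := max 2 (PySem.Int.floordiv (43 - board_w) 2)
  let oy := max 7 (PySem.Int.floordiv (58 - board_h) 2)
  (PySem.List.pyRange 0 n_tiles 1).foldl
    (fun out i =>
      out ++ [(ox + (PySem.Int.mod i ncols) * stride, oy + (PySem.Int.floordiv i ncols) * stride)])
    []

-- ===== PORT B =====
def layout_centered_py_alt (n_tiles : Int) (ncols : Int) (stride : Int) : List (Int × Int) :=
  let nrows := PySem.Int.floordiv (n_tiles + ncols - 1) ncols
  let span_x := (ncols - 1) * stride
  let span_y := (nrows - 1) * stride
  let ox := max 2 (PySem.Int.floordiv (43 - 3 - span_x) 2)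
  let oy := max 7 (PySem.Int.floordiv (55 - span_y) 2)
  let xs := (PySem.List.pyRange 0 (min ncols n_tiles) 1).map (fun col => ox + col * stride)
  let ys := (PySem.List.pyRange 0 nrows 1).map (fun row => oy + row * stride)
  let grid := ys.flatMap (fun y => xs.map (fun x => (x, y)))
  PySem.List.slice grid none (some n_tiles)

-- ===== PRECONDITION & SPEC =====
-- Pre_ excludes ncols ≤ 0: at ncols = 0 A raises ZeroDivisionError; negative ncols is outside the
-- natural grid domain (A there returns tiles at accidental negative column offsets from Python's
-- divisor-signed modulo, a value no caller of a grid layout would specify).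
def Pre_layout_centered_py (n_tiles : Int) (ncols : Int) (stride : Int) : Prop := 1 ≤ ncols
instance (n_tiles : Int) (ncols : Int) (stride : Int) : Decidable (Pre_layout_centered_py n_tiles ncols stride) := by unfold Pre_layout_centered_py; infer_instance
def pvWitness_layout_centered_py : Int × Int × Int := (5, 3, 4)

def Spec_layout_centered_py (n_tiles : Int) (ncols : Int) (stride : Int) (out : List (Int × Int)) : Prop := out = layout_centered_py_alt n_tiles ncols stride
instance (n_tiles : Int) (ncols : Int) (stride : Int) (out : List (Int × Int)) : Decidable (Spec_layout_centered_py n_tiles ncols stride out) := by unfold Spec_layout_centered_py; infer_instance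

-- ===== CLAIM (what is proved, stated in full; the proofs are below) =====
def Claim_equal_layout_centered_py : Prop := ∀ (n_tiles : Int) (ncols : Int) (stride : Int), Dom_layout_centered_py n_tiles ncols stride → Pre_layout_centered_py n_tiles ncols stride → Spec_layout_centered_py n_tiles ncols stride (layout_centered_py n_tiles ncols stride)

-- ===== LEMMAS AND PROOFS =====

-- The full cross-product grid, row by row, equals the divmod map over the flat range 0..Rn*c.
theorem pv_grid_eq (g : Int → Int → Int × Int) (c : Int) (hc : 0 < c) (Rn : Nat) :
    (PySem.List.pyRange 0 (Rn : Int) 1).flatMap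
      (fun row => (PySem.List.pyRange 0 c 1).map (fun col => g row col))
      = (PySem.List.pyRange 0 ((Rn : Int) * c) 1).map
          (fun i => g (PySem.Int.floordiv i c) (PySem.Int.mod i c)) := by
  induction Rn with
  | zero => simp [PySem.List.pyRange_one_eq_nil]
  | succ R ih =>
    have h1 : ((R : Int) + 1) = ((R + 1 : Nat) : Int) := by push_cast; ring
    rw [← h1, PySem.List.pyRange_one_succ_right (by positivity), List.flatMap_append, ih]
    simp only [List.flatMap_cons, List.flatMap_nil, List.append_nil]
    have hsplit : ((R : Int) + 1) * c = (R : Int) * c + c := by ring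
    rw [hsplit,
        PySem.List.pyRange_one_append 0 ((R : Int) * c) ((R : Int) * c + c)
          (by positivity) (by omega), List.map_append]
    congr 1
    rw [PySem.List.pyRange_one (0 : Int) c,
        PySem.List.pyRange_one ((R : Int) * c) ((R : Int) * c + c)]
    have hlen : ((R : Int) * c + c - (R : Int) * c) = c := by ring
    rw [hlen, Int.sub_zero, List.map_map, List.map_map]
    refine List.map_congr_left (fun k hk => ?_)
    have hk' : (k : Int) < c := by
      have := List.mem_range.mp hk; omega
    have hk0 : (0 : Int) ≤ (k : Int) := Int.natCast_nonneg k
    have hdiv : PySem.Int.floordiv ((R : Int) * c + (k : Int)) c = (R : Int) := by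
      rw [PySem.Int.floordiv_eq_iff_of_pos hc]
      constructor <;> nlinarith
    have hmod : PySem.Int.mod ((R : Int) * c + (k : Int)) c = (k : Int) := by
      have := PySem.Int.floordiv_mul_add_mod ((R : Int) * c + (k : Int)) c
      rw [hdiv] at this
      omega
    simp [hdiv, hmod]

theorem layout_eq (n_tiles ncols stride : Int) (hc : 1 ≤ ncols) :
    layout_centered_py n_tiles ncols stride = layout_centered_py_alt n_tiles ncols stride := by
  unfold layout_centered_py layout_centered_py_alt
  simp only []
  set nrows := PySem.Int.floordiv (n_tiles + ncols - 1) ncols with hR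
  have hox : (43 - ((ncols - 1) * stride + 3)) = (43 - 3 - (ncols - 1) * stride) := by ring
  have hoy : (58 - ((nrows - 1) * stride + 3)) = (55 - (nrows - 1) * stride) := by ring
  rw [hox, hoy]
  set ox := max 2 (PySem.Int.floordiv (43 - 3 - (ncols - 1) * stride) 2)
  set oy := max 7 (PySem.Int.floordiv (55 - (nrows - 1) * stride) 2)
  rw [PySem.List.foldl_append_singleton_eq_map, List.nil_append, List.flatMap_map]
  by_cases hn : n_tiles ≤ 0
  · have hRle : nrows ≤ 0 := by
      have h1 : nrows < 1 :=
        (PySem.Int.floordiv_lt_iff_lt_mul (by omega : (0:Int) < ncols)).mpr (by omega)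
      omega
    rw [PySem.List.pyRange_one_eq_nil hn, PySem.List.pyRange_one_eq_nil hRle]
    simp [PySem.List.slice]
  · have hn' : 0 < n_tiles := by omega
    set ncu := min ncols n_tiles with hncu
    have hcu : 0 < ncu := lt_min (by omega) hn'
    have hbr := (PySem.Int.floordiv_eq_iff_of_pos (by omega : (0:Int) < ncols)).mp hR.symm
    have hRpos : 0 < nrows := by nlinarith
    have hle : n_tiles ≤ nrows * ncu := by
      rcases le_or_gt ncols n_tiles with h | h
      · have : ncu = ncols := min_eq_left h
        rw [this]; nlinarith
      · have : ncu = n_tiles := min_eq_right (le_of_lt h)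
        rw [this]; nlinarith
    obtain ⟨Rn, hRn⟩ : ∃ Rn : Nat, nrows = (Rn : Int) := ⟨nrows.toNat, by omega⟩
    rw [hRn] at hle
    have hgrid :
        (PySem.List.pyRange 0 nrows 1).flatMap
          (fun row => ((PySem.List.pyRange 0 ncu 1).map (fun col => ox + col * stride)).map
            (fun x => (x, oy + row * stride)))
          = (PySem.List.pyRange 0 ((Rn : Int) * ncu) 1).map
              (fun i => (ox + (PySem.Int.mod i ncu) * stride,
                         oy + (PySem.Int.floordiv i ncu) * stride)) := by
      rw [hRn]
      have := pv_grid_eq (fun row col => (ox + col * stride, oy + row * stride)) ncu hcu Rn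
      simpa [List.map_map, Function.comp] using this
    rw [hgrid]
    obtain ⟨Nn, hNn⟩ : ∃ Nn : Nat, n_tiles = (Nn : Int) := ⟨n_tiles.toNat, by omega⟩
    have hMc : (Rn : Int) * ncu = ((Rn * ncu.toNat : Nat) : Int) := by
      push_cast; rw [Int.toNat_of_nonneg (by omega)]
    rw [hNn, hMc, PySem.List.slice_to_natCast, PySem.List.pyRange_zero_natCast,
        PySem.List.pyRange_zero_natCast, ← List.map_take, ← List.map_take, List.take_range]
    have hmin : min Nn (Rn * ncu.toNat) = Nn := by
      apply min_eq_left
      have : (Nn : Int) ≤ ((Rn * ncu.toNat : Nat) : Int) := by rw [← hMc, ← hNn]; exact hle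
      exact_mod_cast this
    rw [hmin, List.map_map, List.map_map]
    refine List.map_congr_left (fun k hk => ?_)
    simp only [Function.comp]
    have hkN : ((k : Int)) < n_tiles := by
      have := List.mem_range.mp hk
      rw [hNn]; exact_mod_cast this
    have hk0 : (0 : Int) ≤ (k : Int) := Int.natCast_nonneg k
    rcases le_or_gt ncols n_tiles with h | h
    · simp [hncu, min_eq_left h]
    · have heq : ncu = n_tiles := min_eq_right (le_of_lt h)
      have d1 : PySem.Int.floordiv (k : Int) ncols = 0 := by
        rw [PySem.Int.floordiv_eq_iff_of_pos (by omega)]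
        constructor <;> nlinarith
      have d2 : PySem.Int.floordiv (k : Int) ncu = 0 := by
        rw [PySem.Int.floordiv_eq_iff_of_pos hcu]
        constructor <;> [nlinarith; omega]
      have m1 : PySem.Int.mod (k : Int) ncols = (k : Int) := by
        have := PySem.Int.floordiv_mul_add_mod (k : Int) ncols
        rw [d1] at this; omega
      have m2 : PySem.Int.mod (k : Int) ncu = (k : Int) := by
        have := PySem.Int.floordiv_mul_add_mod (k : Int) ncu
        rw [d2] at this; omega
      simp [d1, d2, m1, m2]

-- ===== VERDICT (by name: the statement is the Claim_ definition above) =====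
theorem layout_centered_py_spec : Claim_equal_layout_centered_py := by
  intro n_tiles ncols stride _ hpre
  unfold Spec_layout_centered_py
  exact layout_eq n_tiles ncols stride hpre
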